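-- pv_equiv track=rewrite | github.com/khurrumsaleem/kika | kika/njoy/modules/_base.py | parse_card_values
-- ===== SOURCE A (Python) =====
-- def parse_card_values(line: str) -> list[str]:
--     """Extract numeric/token data from an NJOY card line.
--
--     In NJOY input, ``/`` terminates the data portion of a card — everything
--     after the first ``/`` (outside single quotes) is treated as a comment.
--     Returns the list of whitespace-separated tokens from the data portion.
--     """
--     line = line.strip()
--     # Find the first '/' that is not inside single quotes
--     in_quote = False
--     for i, ch in enumerate(line):
--         if ch == "'":
--             in_quote = not in_quote
--         elif ch == "/" and not in_quote:
--             line = line[:i].strip()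
--             break
--     return line.split()
-- ===== SOURCE B (Python) =====
-- def parse_card_values(line: str) -> list[str]:
--     """Extract tokens from an NJOY card line before the first unquoted '/'.
--
--     Different decomposition from the toggle-flag scan: a single forward
--     pass over an iterator that consumes a whole quoted segment at a time
--     (no index bookkeeping, no slicing, no in_quote flag); str.split()
--     discards surrounding whitespace.
--     """
--     chars = iter(line.strip())
--     out = []
--     for ch in chars:
--         if ch == "'":
--             out.append(ch)
--             for c in chars:
--                 out.append(c)
--                 if c == "'":
--                     break
--         elif ch == "/":
--             break
--         else:
--             out.append(ch)
--     return "".join(out).split()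
-- ===== Notes on version B (the rewrite author's own statement) =====
-- stated objective: alternative
-- what changed: Replaced the indexed in_quote-toggle scan that finds a cut position and then slices and re-strips the line with a single forward pass over a character iterator that consumes a whole quoted segment at a time and builds the data prefix directly (no index, no flag, no slicing).
import Mathlib
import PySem

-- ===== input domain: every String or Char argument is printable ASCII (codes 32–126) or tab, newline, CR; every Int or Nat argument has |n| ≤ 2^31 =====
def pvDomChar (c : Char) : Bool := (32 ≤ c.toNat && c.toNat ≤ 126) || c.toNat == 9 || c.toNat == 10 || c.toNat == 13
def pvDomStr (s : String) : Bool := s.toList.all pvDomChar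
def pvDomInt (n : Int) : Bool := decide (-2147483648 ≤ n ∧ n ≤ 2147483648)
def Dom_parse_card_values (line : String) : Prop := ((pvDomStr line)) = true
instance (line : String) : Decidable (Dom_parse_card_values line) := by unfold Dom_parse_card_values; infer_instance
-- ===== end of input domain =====

-- B replaces A's indexed in_quote-toggle scan + slice/re-strip with a direct nested-consumption
-- scan (consume a whole quoted segment at a time, build the prefix directly); objective: alternative.


-- ===== PORT A =====
-- the for-loop over enumerate(line): s is the (stripped) string being scanned, the second
-- argument the remaining characters, i the current index, q the in_quote flag; on break the
-- function returns line[:i].strip(), at loop end the unchanged line.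
def pvALoop (s : List Char) : List Char → Nat → Bool → List Char
  | [], _, _ => s
  | c :: rest, i, q =>
    if c = '\'' then pvALoop s rest (i + 1) (!q)
    else if c = '/' ∧ q = false then PySem.Chars.strip (s.take i)
    else pvALoop s rest (i + 1) q

def parse_card_values (line : String) : List String :=
  (PySem.Chars.split₀ (pvALoop (PySem.Chars.strip line.toList)
    (PySem.Chars.strip line.toList) 0 false)).map String.ofList

-- ===== PORT B =====
-- the inner 'for c in chars: append; break on quote': returns (consumed chars, rest of iterator)
def pvBQuoted : List Char → List Char × List Char
  | [] => ([], [])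
  | c :: rest =>
    if c = '\'' then ([c], rest)
    else
      let (p, r) := pvBQuoted rest
      (c :: p, r)

lemma pvBQuoted_snd_length : ∀ xs : List Char, (pvBQuoted xs).2.length ≤ xs.length := by
  intro xs
  induction xs with
  | nil => simp [pvBQuoted]
  | cons c rest ih =>
    by_cases h : c = '\''
    · simp [pvBQuoted, h]
    · simp [pvBQuoted, h]; omega


-- the outer 'for ch in chars' loop building out
def pvBScan : List Char → List Char
  | [] => []
  | c :: rest =>
    if c = '\'' then
      let pr := pvBQuoted rest
      c :: (pr.1 ++ pvBScan pr.2)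
    else if c = '/' then []
    else c :: pvBScan rest
termination_by xs => xs.length
decreasing_by
  · exact Nat.lt_succ_of_le (pvBQuoted_snd_length rest)
  · simp

def parse_card_values_alt (line : String) : List String :=
  (PySem.Chars.split₀ (pvBScan (PySem.Chars.strip line.toList))).map String.ofList

-- ===== PRECONDITION & SPEC =====
def Spec_parse_card_values (line : String) (out : List String) : Prop := out = parse_card_values_alt line
instance (line : String) (out : List String) : Decidable (Spec_parse_card_values line out) := by unfold Spec_parse_card_values; infer_instance

-- ===== CLAIM (what is proved, stated in full; the proofs are below) =====
def Claim_equal_parse_card_values : Prop := ∀ (line : String), Dom_parse_card_values line → Spec_parse_card_values line (parse_card_values line)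

-- ===== LEMMAS AND PROOFS =====

-- the common specification: the prefix of xs before the first slash outside single quotes
def pvCut : List Char → Bool → List Char
  | [], _ => []
  | c :: rest, q =>
    if c = '\'' then c :: pvCut rest (!q)
    else if c = '/' ∧ q = false then []
    else c :: pvCut rest q

-- split() ignores all-whitespace tails: go over a whitespace list ends the word like go []
lemma pvGo_ws (ws : List Char) (h : ∀ c ∈ ws, PySem.Chars.isspace c = true) :
    ∀ cur acc, PySem.Chars.split₀.go ws cur acc = PySem.Chars.split₀.go [] cur acc := by
  induction ws with
  | nil => intro cur acc; rfl
  | cons c rest ih =>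
    intro cur acc
    have hc : PySem.Chars.isspace c = true := h c (by simp)
    have hr : ∀ c ∈ rest, PySem.Chars.isspace c = true := fun c hm => h c (by simp [hm])
    cases cur with
    | nil => simp [PySem.Chars.split₀.go, hc, ih hr]
    | cons d cur' => simp [PySem.Chars.split₀.go, hc, ih hr]

lemma pvGo_append_ws (ws : List Char) (h : ∀ c ∈ ws, PySem.Chars.isspace c = true) :
    ∀ xs cur acc, PySem.Chars.split₀.go (xs ++ ws) cur acc = PySem.Chars.split₀.go xs cur acc := by
  intro xs
  induction xs with
  | nil =>
    intro cur acc
    simpa using pvGo_ws ws h cur acc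
  | cons c rest ih =>
    intro cur acc
    by_cases hc : PySem.Chars.isspace c = true <;>
      simp [PySem.Chars.split₀.go, hc, ih]

lemma pvGo_lstrip : ∀ (xs : List Char) acc,
    PySem.Chars.split₀.go (List.dropWhile PySem.Chars.isspace xs) [] acc = PySem.Chars.split₀.go xs [] acc := by
  intro xs
  induction xs with
  | nil => intro acc; rfl
  | cons c rest ih =>
    intro acc
    by_cases hc : PySem.Chars.isspace c = true <;>
      simp [PySem.Chars.split₀.go, hc, ih]

lemma pvSplit_strip (xs : List Char) :
    PySem.Chars.split₀ (PySem.Chars.strip xs) = PySem.Chars.split₀ xs := by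
  unfold PySem.Chars.split₀ PySem.Chars.strip PySem.Chars.rstrip PySem.Chars.lstrip
  set ys := List.dropWhile PySem.Chars.isspace xs with hys
  have hdecomp : ys = (List.dropWhile PySem.Chars.isspace ys.reverse).reverse
      ++ (List.takeWhile PySem.Chars.isspace ys.reverse).reverse := by
    conv_rhs => rw [← List.reverse_append, List.takeWhile_append_dropWhile]
    simp
  have hws : ∀ c ∈ (List.takeWhile PySem.Chars.isspace ys.reverse).reverse,
      PySem.Chars.isspace c = true := by
    intro c hm
    exact List.mem_takeWhile_imp (by simpa using hm)
  calc PySem.Chars.split₀.go (List.dropWhile PySem.Chars.isspace ys.reverse).reverse [] []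
      = PySem.Chars.split₀.go ((List.dropWhile PySem.Chars.isspace ys.reverse).reverse
          ++ (List.takeWhile PySem.Chars.isspace ys.reverse).reverse) [] [] :=
        (pvGo_append_ws _ hws _ [] []).symm
    _ = PySem.Chars.split₀.go ys [] [] := by rw [← hdecomp]
    _ = PySem.Chars.split₀.go xs [] [] := by rw [hys]; exact pvGo_lstrip xs []

-- A's loop computes (up to split) the cut prefix
lemma pvALoop_split (rest : List Char) : ∀ (pre : List Char) (q : Bool),
    PySem.Chars.split₀ (pvALoop (pre ++ rest) rest pre.length q)
      = PySem.Chars.split₀ (pre ++ pvCut rest q) := by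
  induction rest with
  | nil => intro pre q; simp [pvALoop, pvCut]
  | cons c rest ih =>
    intro pre q
    by_cases hq : c = '\''
    · subst hq
      have h1 : pre ++ '\'' :: rest = (pre ++ ['\'']) ++ rest := by simp
      have h2 : pre.length + 1 = (pre ++ ['\'']).length := by simp
      simp only [pvALoop, pvCut, reduceIte]
      rw [h1, h2, ih (pre ++ ['\'']) (!q)]
      simp
    · by_cases hs : c = '/' ∧ q = false
      · simp only [pvALoop, pvCut, if_neg hq, if_pos hs]
        rw [List.take_left' rfl, pvSplit_strip]
        simp
      · have h1 : pre ++ c :: rest = (pre ++ [c]) ++ rest := by simp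
        have h2 : pre.length + 1 = (pre ++ [c]).length := by simp
        simp only [pvALoop, pvCut, if_neg hq, if_neg hs]
        rw [h1, h2, ih (pre ++ [c]) q]
        simp

-- B's inner quoted-segment consumption is cut in in-quote mode
lemma pvBQuoted_cut (xs : List Char) :
    pvCut xs true = (pvBQuoted xs).1 ++ pvCut (pvBQuoted xs).2 false := by
  induction xs with
  | nil => simp [pvCut, pvBQuoted]
  | cons c rest ih =>
    by_cases hq : c = '\''
    · simp [pvCut, pvBQuoted, hq]
    · simp [pvCut, pvBQuoted, hq, ih]

lemma pvBScan_cut (xs : List Char) : pvBScan xs = pvCut xs false := by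
  induction xs using pvBScan.induct with
  | case1 => simp [pvBScan, pvCut]
  | case2 rest pr ih =>
    simp only [pvBScan, pvCut, reduceIte, Bool.not_false]
    rw [pvBQuoted_cut rest]
    exact congrArg (fun t => '\'' :: ((pvBQuoted rest).1 ++ t)) ih
  | case3 rest h =>
    simp [pvBScan, pvCut]
  | case4 c rest hq hs ih =>
    simp [pvBScan, pvCut, hq, hs, ih]

-- ===== VERDICT (by name: the statement is the Claim_ definition above) =====
theorem parse_card_values_spec : Claim_equal_parse_card_values := by
  intro line _
  unfold Spec_parse_card_values parse_card_values parse_card_values_alt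
  have h := pvALoop_split (PySem.Chars.strip line.toList) [] false
  simp only [List.nil_append, List.length_nil] at h
  rw [h, pvBScan_cut]
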